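-- pv_equiv track=rewrite | github.com/mhetrerajat/ds-challenge | rmq.py | trivial
-- ===== SOURCE A (Python) =====
-- def trivial(A, length):
--     matrix = [[0]*length for _ in range(length)]
--     for i in range(length):
--         matrix[i][i] = i
--
--
--     for i in range(length):
--         for j in range(i+1, length):
--             # Compare with just previous range of elements
--             if A[matrix[i][j-1]] >= A[j]:
--                 matrix[i][j] = j
--             else:
--                 matrix[i][j] = matrix[i][j-1]
--
--
--     return matrix
-- ===== SOURCE B (Python) =====
-- def trivial(A, length):
--     matrix = [[0] * length for _ in range(length)]
--     for j in range(length):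
--         matrix[j][j] = j
--         for i in range(j - 1, -1, -1):
--             k = matrix[i + 1][j]
--             matrix[i][j] = i if A[i] < A[k] else k
--     return matrix
-- ===== Notes on version B (the rewrite author's own statement) =====
-- stated objective: alternative
-- what changed: B fills the argmin matrix column by column, extending each range leftward from a fixed right endpoint with a strict '<' comparison (recurrence on matrix[i+1][j]), instead of A's row-by-row rightward extension comparing with '>=' (recurrence on matrix[i][j-1]).
import Mathlib
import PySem

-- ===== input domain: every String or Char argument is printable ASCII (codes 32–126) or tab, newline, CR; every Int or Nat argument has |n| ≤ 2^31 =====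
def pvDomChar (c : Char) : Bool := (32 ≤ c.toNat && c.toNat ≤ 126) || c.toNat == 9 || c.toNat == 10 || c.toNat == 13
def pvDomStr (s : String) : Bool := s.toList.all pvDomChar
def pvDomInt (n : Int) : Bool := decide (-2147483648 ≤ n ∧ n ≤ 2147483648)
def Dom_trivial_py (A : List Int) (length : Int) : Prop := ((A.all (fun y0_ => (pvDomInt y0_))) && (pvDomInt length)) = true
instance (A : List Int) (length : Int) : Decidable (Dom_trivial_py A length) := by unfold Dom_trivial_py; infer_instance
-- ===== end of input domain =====

-- B builds the same argmin matrix column by column, extending ranges leftward with a strict '<'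
-- (recurrence on matrix[i+1][j]) instead of A's row-by-row rightward extension with '>='; objective: alternative decomposition.

-- ===== PORT A =====
-- Port notes: range(length) for an Int length is empty when length ≤ 0, matched by
-- List.range length.toNat; all loop indices are ≥ 0, so Nat-indexed List.set/List.getD
-- are exact; the reads A[...] use getD, exact under Pre_trivial_py (indices in range there).
-- one helper per loop body: matrix[i][i] = i
def stepDiag (m : List (List Int)) (i : Nat) : List (List Int) :=
  m.set i ((m.getD i []).set i (i : Int))
-- body of the inner j-loop of A (row i fixed)
def stepInnerA (A : List Int) (i : Nat) (m : List (List Int)) (j : Nat) : List (List Int) :=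
  let p := (m.getD i []).getD (j-1) 0
  m.set i ((m.getD i []).set j (if A.getD p.toNat 0 ≥ A.getD j 0 then (j : Int) else p))
-- body of the outer i-loop of A: for j in range(i+1, length)
def stepOuterA (A : List Int) (n : Nat) (m : List (List Int)) (i : Nat) : List (List Int) :=
  (List.range' (i+1) (n - (i+1))).foldl (stepInnerA A i) m

def trivial_py (A : List Int) (length : Int) : List (List Int) :=
  let n := length.toNat
  let matrix := List.replicate n (List.replicate n (0 : Int))
  let matrix := (List.range n).foldl stepDiag matrix
  (List.range n).foldl (stepOuterA A n) matrix

-- ===== PORT B =====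
-- range(j-1, -1, -1) is [j-1, …, 0], matched by (List.range j).reverse.
-- body of the inner i-loop of B (column j fixed)
def stepInnerB (A : List Int) (j : Nat) (m : List (List Int)) (i : Nat) : List (List Int) :=
  let k := (m.getD (i+1) []).getD j 0
  m.set i ((m.getD i []).set j (if A.getD i 0 < A.getD k.toNat 0 then (i : Int) else k))
-- body of the outer j-loop of B: set the diagonal, then i from j-1 down to 0
def stepOuterB (A : List Int) (m : List (List Int)) (j : Nat) : List (List Int) :=
  (List.range j).reverse.foldl (stepInnerB A j) (m.set j ((m.getD j []).set j (j : Int)))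

def trivial_py_alt (A : List Int) (length : Int) : List (List Int) :=
  (List.range length.toNat).foldl (stepOuterB A)
    (List.replicate length.toNat (List.replicate length.toNat (0 : Int)))

-- ===== PRECONDITION & SPEC =====
-- Pre_ excludes exactly the inputs on which Python A raises IndexError
-- (length ≥ 2 together with length > len(A)); B raises there too.
def Pre_trivial_py (A : List Int) (length : Int) : Prop :=
  length ≤ 1 ∨ length ≤ (A.length : Int)
instance (A : List Int) (length : Int) : Decidable (Pre_trivial_py A length) := by
  unfold Pre_trivial_py; infer_instance
def pvWitness_trivial_py : List Int × Int := ([5, 3, 3, 7], 4)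
def Spec_trivial_py (A : List Int) (length : Int) (out : List (List Int)) : Prop := out = trivial_py_alt A length
instance (A : List Int) (length : Int) (out : List (List Int)) : Decidable (Spec_trivial_py A length out) := by unfold Spec_trivial_py; infer_instance

-- ===== CLAIM (what is proved, stated in full; the proofs are below) =====
def Claim_equal_trivial_py : Prop := ∀ (A : List Int) (length : Int), Dom_trivial_py A length → Pre_trivial_py A length → Spec_trivial_py A length (trivial_py A length)

-- ===== LEMMAS AND PROOFS =====

-- Pure recurrences: mA is A's left-to-right argmin recurrence, mB is B's right-to-left one.
def mA (A : List Int) (i : Nat) : Nat → Nat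
  | 0 => i
  | j+1 => if j + 1 ≤ i then i else
      (if A.getD (mA A i j) 0 ≥ A.getD (j+1) 0 then j+1 else mA A i j)

def mB (A : List Int) (i j : Nat) : Nat :=
  if h : i < j then
    (if A.getD i 0 < A.getD (mB A (i+1) j) 0 then i else mB A (i+1) j)
  else j
termination_by j - i

lemma mA_self (A : List Int) (i : Nat) : mA A i i = i := by
  cases i <;> simp [mA]

lemma mB_self (A : List Int) (j : Nat) : mB A j j = j := by
  unfold mB; simp

-- Characterisation: k is the LAST index of a minimum of A on [i, j].
def IsArg (A : List Int) (i j k : Nat) : Prop :=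
  i ≤ k ∧ k ≤ j ∧ (∀ t, i ≤ t → t ≤ j → A.getD k 0 ≤ A.getD t 0) ∧
    (∀ t, k < t → t ≤ j → A.getD k 0 < A.getD t 0)

lemma isArg_mA (A : List Int) (i : Nat) : ∀ j, i ≤ j → IsArg A i j (mA A i j) := by
  intro j
  induction j with
  | zero =>
    intro hij
    have : i = 0 := Nat.le_zero.mp hij
    subst this
    refine ⟨le_refl _, le_refl _, ?_, ?_⟩
    · intro t h1 h2
      have : t = 0 := by omega
      subst this; exact le_refl _
    · intro t h1 h2; omega
  | succ j ih =>
    intro hij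
    by_cases hle : j + 1 ≤ i
    · have hi : i = j + 1 := le_antisymm hij hle
      subst hi
      refine ⟨?_, ?_, ?_, ?_⟩ <;> simp [mA_self]
      · intro t h1 h2; have : t = j + 1 := by omega
        subst this; exact le_refl _
      · intro t h1 h2; omega
    · have hij' : i ≤ j := by omega
      obtain ⟨h1, h2, hmin, hstrict⟩ := ih hij'
      by_cases hc : A.getD (mA A i j) 0 ≥ A.getD (j+1) 0
      · have hval : mA A i (j+1) = j+1 := by simp only [mA]; rw [if_neg hle, if_pos hc]
        rw [hval]
        refine ⟨by omega, le_refl _, ?_, ?_⟩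
        · intro t ht1 ht2
          rcases Nat.lt_or_ge t (j+1) with h | h
          · exact le_trans hc (hmin t ht1 (by omega))
          · have : t = j + 1 := by omega
            subst this; exact le_refl _
        · intro t ht1 ht2; omega
      · have hval : mA A i (j+1) = mA A i j := by simp only [mA]; rw [if_neg hle, if_neg hc]
        rw [hval]
        push_neg at hc
        refine ⟨h1, by omega, ?_, ?_⟩
        · intro t ht1 ht2
          rcases Nat.lt_or_ge t (j+1) with h | h
          · exact hmin t ht1 (by omega)
          · have : t = j + 1 := by omega
            subst this; exact le_of_lt hc
        · intro t ht1 ht2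
          rcases Nat.lt_or_ge t (j+1) with h | h
          · exact hstrict t ht1 (by omega)
          · have : t = j + 1 := by omega
            subst this; exact hc

lemma isArg_mB_aux (A : List Int) : ∀ d i j, j - i ≤ d → i ≤ j → IsArg A i j (mB A i j) := by
  intro d
  induction d with
  | zero =>
    intro i j hd hij
    have : i = j := by omega
    subst this
    rw [mB_self]
    refine ⟨le_refl _, le_refl _, ?_, ?_⟩
    · intro t h1 h2
      have : t = i := by omega
      subst this; exact le_refl _
    · intro t h1 h2; omega
  | succ d ih =>
    intro i j hd hij
    by_cases h : i < j
    · obtain ⟨a, b, hmin, hstrict⟩ := ih (i+1) j (by omega) (by omega)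
      have hval : mB A i j
          = if A.getD i 0 < A.getD (mB A (i+1) j) 0 then i else mB A (i+1) j := by
        rw [mB]; rw [dif_pos h]
      by_cases hc : A.getD i 0 < A.getD (mB A (i+1) j) 0
      · rw [hval, if_pos hc]
        refine ⟨le_refl _, by omega, ?_, ?_⟩
        · intro t ht1 ht2
          rcases eq_or_lt_of_le ht1 with he | hlt
          · rw [← he]
          · exact le_of_lt (lt_of_lt_of_le hc (hmin t (by omega) ht2))
        · intro t ht1 ht2
          exact lt_of_lt_of_le hc (hmin t (by omega) ht2)
      · rw [hval, if_neg hc]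
        refine ⟨by omega, b, ?_, ?_⟩
        · intro t ht1 ht2
          rcases eq_or_lt_of_le ht1 with he | hlt
          · rw [← he]; exact not_lt.mp hc
          · exact hmin t (by omega) ht2
        · intro t ht1 ht2
          exact hstrict t ht1 ht2
    · have : i = j := by omega
      subst this
      rw [mB_self]
      refine ⟨le_refl _, le_refl _, ?_, ?_⟩
      · intro t h1 h2
        have : t = i := by omega
        subst this; exact le_refl _
      · intro t h1 h2; omega

lemma isArg_unique (A : List Int) (i j k1 k2 : Nat)
    (h1 : IsArg A i j k1) (h2 : IsArg A i j k2) : k1 = k2 := by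
  obtain ⟨a1, b1, m1, s1⟩ := h1
  obtain ⟨a2, b2, m2, s2⟩ := h2
  rcases Nat.lt_trichotomy k1 k2 with h | h | h
  · have := s1 k2 h b2
    have := m2 k1 a1 b1
    omega
  · exact h
  · have := s2 k1 h b1
    have := m1 k2 a2 b2
    omega

lemma mA_eq_mB (A : List Int) (i j : Nat) (h : i ≤ j) : mA A i j = mB A i j :=
  isArg_unique A i j _ _ (isArg_mA A i j h) (isArg_mB_aux A (j - i) i j (le_refl _) h)

-- Matrix helpers: our matrices are maps over List.range.
def matE (n : Nat) (f : Nat → Nat → Int) : List (List Int) :=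
  (List.range n).map (fun r => (List.range n).map (f r))

lemma getD_mapRange {α : Type} (f : Nat → α) (d : α) (k n : Nat) (h : k < n) :
    ((List.range n).map f).getD k d = f k := by
  simp [List.getD_eq_getElem?_getD, h]

lemma set_mapRange {α : Type} (f : Nat → α) (v : α) (k n : Nat) (h : k < n) :
    ((List.range n).map f).set k v
      = (List.range n).map (fun i => if i = k then v else f i) := by
  apply List.ext_getElem
  · simp
  · intro i h1 h2
    simp only [List.getElem_set, List.getElem_map, List.getElem_range]
    rcases Nat.decEq k i with h | h
    · simp [if_neg (by omega : ¬ k = i), if_neg (by omega : ¬ i = k)]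
    · subst h; simp

lemma mapRange_congr {α : Type} (n : Nat) (f g : Nat → α)
    (h : ∀ i, i < n → f i = g i) : (List.range n).map f = (List.range n).map g := by
  apply List.map_congr_left
  intro i hi
  exact h i (List.mem_range.mp hi)

lemma matE_congr (n : Nat) (f g : Nat → Nat → Int)
    (h : ∀ r c, r < n → c < n → f r c = g r c) : matE n f = matE n g := by
  unfold matE
  apply mapRange_congr
  intro r hr
  apply mapRange_congr
  intro c hc
  exact h r c hr hc

lemma replicate_matE (n : Nat) :
    List.replicate n (List.replicate n (0 : Int)) = matE n (fun _ _ => 0) := by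
  unfold matE
  apply List.ext_getElem <;> simp

-- State formulas: stA A k u r c is entry (r,c) of A's matrix when rows < k are complete,
-- row k is filled up to column u, and rows > k carry only their diagonal.
def stA (A : List Int) (k u r c : Nat) : Int :=
  if (r < k ∧ r ≤ c) ∨ (r = k ∧ r ≤ c ∧ c ≤ u) ∨ (k < r ∧ c = r) then (mA A r c : Int) else 0

-- stB A k s r c is entry (r,c) of B's matrix when columns < k are complete and
-- column k is filled on rows s..k (diagonal included).
def stB (A : List Int) (k s r c : Nat) : Int :=
  if (r ≤ c ∧ c < k) ∨ (c = k ∧ s ≤ r ∧ r ≤ k) then (mB A r c : Int) else 0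

lemma getD_matE (n : Nat) (f : Nat → Nat → Int) (r : Nat) (h : r < n) :
    (matE n f).getD r [] = (List.range n).map (f r) :=
  getD_mapRange _ _ _ _ h

lemma set_row_matE (n : Nat) (f : Nat → Nat → Int) (r : Nat) (h : r < n) (g : Nat → Int) :
    (matE n f).set r ((List.range n).map g)
      = matE n (fun r' c => if r' = r then g c else f r' c) := by
  unfold matE
  rw [set_mapRange _ _ _ _ h]
  apply mapRange_congr
  intro i _
  split_ifs with hir <;> simp [hir]

lemma diagA (n : Nat) : ∀ k, k ≤ n →
    (List.range k).foldl stepDiag (List.replicate n (List.replicate n (0 : Int)))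
      = matE n (fun r c => if r = c ∧ r < k then (r : Int) else 0) := by
  intro k
  induction k with
  | zero =>
    intro _
    rw [replicate_matE]
    apply matE_congr; intro r c _ _; simp
  | succ k ih =>
    intro hk
    have hkn : k < n := by omega
    rw [List.range_succ, List.foldl_append, ih (by omega)]
    simp only [List.foldl_cons, List.foldl_nil, stepDiag]
    rw [getD_matE _ _ _ hkn, set_mapRange _ _ _ _ hkn, set_row_matE _ _ _ hkn]
    apply matE_congr
    intro r c hr hc
    split_ifs <;> omega

lemma fillA_inner (A : List Int) (n k : Nat) (hk : k < n) :
    ∀ cnt, k + 1 + cnt ≤ n →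
      (List.range' (k+1) cnt).foldl (stepInnerA A k) (matE n (stA A k k))
        = matE n (stA A k (k + cnt)) := by
  intro cnt
  induction cnt with
  | zero => intro _; rfl
  | succ cnt ih =>
    intro h
    rw [List.range'_concat, List.foldl_append, ih (by omega)]
    simp only [List.foldl_cons, List.foldl_nil, stepInnerA]
    rw [(by omega : k + 1 + 1 * cnt = k + cnt + 1)]
    have hj : k + cnt + 1 < n := by omega
    rw [getD_matE _ _ _ hk]
    rw [(by omega : k + cnt + 1 - 1 = k + cnt)]
    rw [getD_mapRange _ _ _ _ (by omega : k + cnt < n)]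
    have hp : stA A k (k + cnt) k (k + cnt) = (mA A k (k + cnt) : Int) := by
      unfold stA
      rw [if_pos (Or.inr (Or.inl ⟨rfl, by omega, le_refl _⟩))]
    rw [hp]
    have hval : (if A.getD (Int.toNat (mA A k (k + cnt) : Int)) 0 ≥ A.getD (k+cnt+1) 0
        then ((k+cnt+1 : Nat) : Int) else (mA A k (k + cnt) : Int))
        = (mA A k (k + cnt + 1) : Int) := by
      rw [Int.toNat_natCast]
      simp only [mA]
      rw [if_neg (by omega : ¬ k + cnt + 1 ≤ k)]
      split_ifs <;> rfl
    rw [hval, set_mapRange _ _ _ _ hj, set_row_matE _ _ _ hk]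
    apply matE_congr
    intro r c hr hc
    by_cases hrk : r = k
    · subst hrk
      rw [if_pos rfl]
      by_cases hcj : c = r + cnt + 1
      · subst hcj
        rw [if_pos rfl]
        unfold stA
        rw [if_pos (show r < r ∧ r ≤ r + cnt + 1 ∨
            r = r ∧ r ≤ r + cnt + 1 ∧ r + cnt + 1 ≤ r + (cnt + 1) ∨
            r < r ∧ r + cnt + 1 = r by omega)]
      · rw [if_neg hcj]
        unfold stA
        split_ifs <;> first | rfl | omega
    · rw [if_neg hrk]
      unfold stA
      split_ifs <;> first | rfl | omega

lemma fillA_outer (A : List Int) (n : Nat) : ∀ k, k ≤ n →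
    (List.range k).foldl (stepOuterA A n) (matE n (stA A 0 0))
      = matE n (stA A k k) := by
  intro k
  induction k with
  | zero => intro _; rfl
  | succ k ih =>
    intro hk
    have hkn : k < n := by omega
    rw [List.range_succ, List.foldl_append, ih (by omega)]
    simp only [List.foldl_cons, List.foldl_nil, stepOuterA]
    rw [fillA_inner A n k hkn (n - (k+1)) (by omega)]
    apply matE_congr
    intro r c hr hc
    unfold stA
    split_ifs <;> first | rfl | omega

lemma portA_eq (A : List Int) (length : Int) :
    trivial_py A length
      = matE length.toNat (fun r c => if r ≤ c then (mA A r c : Int) else 0) := by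
  simp only [trivial_py]
  rw [diagA length.toNat length.toNat (le_refl _)]
  have hd : (matE length.toNat fun r c => if r = c ∧ r < length.toNat then (r : Int) else 0)
      = matE length.toNat (stA A 0 0) := by
    apply matE_congr
    intro r c hr hc
    unfold stA
    by_cases h1 : r = c ∧ r < length.toNat
    · obtain ⟨he, h1b⟩ := h1
      subst he
      rw [if_pos (⟨rfl, h1b⟩ : _ ∧ _),
        if_pos (show r < 0 ∧ r ≤ r ∨ r = 0 ∧ r ≤ r ∧ r ≤ 0 ∨ 0 < r ∧ r = r by omega), mA_self]
    · rw [if_neg h1, if_neg (by omega)]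
  rw [hd, fillA_outer A length.toNat length.toNat (le_refl _)]
  apply matE_congr
  intro r c hr hc
  unfold stA
  split_ifs <;> first | rfl | omega

lemma fillB_inner (A : List Int) (n k : Nat) (hk : k < n) :
    ∀ s, s ≤ k →
      (List.range s).reverse.foldl (stepInnerB A k) (matE n (stB A k s))
        = matE n (stB A k 0) := by
  intro s
  induction s with
  | zero => intro _; rfl
  | succ s ih =>
    intro hs
    rw [List.range_succ, List.reverse_append]
    simp only [List.reverse_cons, List.reverse_nil, List.nil_append, List.cons_append,
      List.foldl_cons, stepInnerB]
    have hs1 : s + 1 < n := by omega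
    have hs0 : s < n := by omega
    rw [getD_matE _ _ _ hs1, getD_mapRange _ _ _ _ hk]
    have hkk : stB A k (s+1) (s+1) k = (mB A (s+1) k : Int) := by
      unfold stB
      rw [if_pos (Or.inr ⟨rfl, le_refl _, by omega⟩)]
    rw [hkk, Int.toNat_natCast]
    have hmB : mB A s k
        = if A.getD s 0 < A.getD (mB A (s+1) k) 0 then s else mB A (s+1) k := by
      rw [mB, dif_pos (by omega : s < k)]
    have hval : (if A.getD s 0 < A.getD (mB A (s+1) k) 0
        then ((s : Nat) : Int) else (mB A (s+1) k : Int)) = (mB A s k : Int) := by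
      rw [hmB]
      split_ifs <;> rfl
    rw [hval, getD_matE _ _ _ hs0, set_mapRange _ _ _ _ hk, set_row_matE _ _ _ hs0]
    have hstate : (matE n fun r' c =>
        if r' = s then (if c = k then (mB A s k : Int) else stB A k (s+1) s c)
        else stB A k (s+1) r' c) = matE n (stB A k s) := by
      apply matE_congr
      intro r c hr hc
      by_cases hrs : r = s
      · subst hrs
        rw [if_pos rfl]
        by_cases hck : c = k
        · subst hck
          rw [if_pos rfl]
          unfold stB
          rw [if_pos (Or.inr ⟨rfl, le_refl _, by omega⟩)]
        · rw [if_neg hck]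
          unfold stB
          split_ifs <;> first | rfl | omega
      · rw [if_neg hrs]
        unfold stB
        split_ifs <;> first | rfl | omega
    rw [hstate, ih (by omega)]

lemma fillB_outer (A : List Int) (n : Nat) : ∀ k, k ≤ n →
    (List.range k).foldl (stepOuterB A) (List.replicate n (List.replicate n (0 : Int)))
      = matE n (fun r c => if r ≤ c ∧ c < k then (mB A r c : Int) else 0) := by
  intro k
  induction k with
  | zero =>
    intro _
    rw [replicate_matE]
    apply matE_congr; intro r c _ _; simp
  | succ k ih =>
    intro hk
    have hkn : k < n := by omega
    rw [List.range_succ, List.foldl_append, ih (by omega)]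
    simp only [List.foldl_cons, List.foldl_nil, stepOuterB]
    rw [getD_matE _ _ _ hkn, set_mapRange _ _ _ _ hkn, set_row_matE _ _ _ hkn]
    have hstate : (matE n fun r' c =>
        if r' = k then (if c = k then (k : Int) else if k ≤ c ∧ c < k then (mB A k c : Int) else 0)
        else if r' ≤ c ∧ c < k then (mB A r' c : Int) else 0) = matE n (stB A k k) := by
      apply matE_congr
      intro r c hr hc
      by_cases hrk : r = k
      · subst hrk
        rw [if_pos rfl]
        by_cases hck : c = r
        · subst hck
          rw [if_pos rfl]
          unfold stB
          rw [if_pos (Or.inr ⟨rfl, le_refl _, le_refl _⟩), mB_self]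
        · rw [if_neg hck]
          unfold stB
          split_ifs <;> first | rfl | omega
      · rw [if_neg hrk]
        unfold stB
        split_ifs <;> first | rfl | omega
    rw [hstate, fillB_inner A n k hkn k (le_refl _)]
    apply matE_congr
    intro r c hr hc
    unfold stB
    split_ifs <;> first | rfl | omega

lemma portB_eq (A : List Int) (length : Int) :
    trivial_py_alt A length
      = matE length.toNat (fun r c => if r ≤ c then (mB A r c : Int) else 0) := by
  unfold trivial_py_alt
  rw [fillB_outer A length.toNat length.toNat (le_refl _)]
  apply matE_congr
  intro r c hr hc
  split_ifs <;> first | rfl | omega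

-- ===== VERDICT (by name: the statement is the Claim_ definition above) =====
theorem trivial_py_spec : Claim_equal_trivial_py := by
  intro A length _ _
  unfold Spec_trivial_py
  rw [portA_eq, portB_eq]
  apply matE_congr
  intro r c hr hc
  split_ifs with h
  · rw [mA_eq_mB A r c h]
  · rfl
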